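-- pv_equiv track=rewrite | github.com/mydoor110/banzu-mysql- | blueprints/admin.py | _normalize_import_text
-- ===== SOURCE A (Python) =====
-- def _normalize_import_text(value):
--     text = '' if value is None else str(value).strip()
--     if not text:
--         return ''
--     text = text.lower()
--     for ch in (' ', '\t', '\n', '_', '-'):
--         text = text.replace(ch, '')
--     return text
-- ===== SOURCE B (Python) =====
-- _REMOVE = {' ', '\t', '\n', '_', '-'}
--
-- def _normalize_import_text(value):
--     text = '' if value is None else str(value).strip()
--     if not text:
--         return ''
--     return ''.join(c for c in text.lower() if c not in _REMOVE)
-- ===== Notes on version B (the rewrite author's own statement) =====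
-- stated objective: simpler
-- what changed: Replaced the five sequential full-string .replace passes (one per deletion character) with a single filtering pass over the lowercased text joining only the kept characters.
import Mathlib
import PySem

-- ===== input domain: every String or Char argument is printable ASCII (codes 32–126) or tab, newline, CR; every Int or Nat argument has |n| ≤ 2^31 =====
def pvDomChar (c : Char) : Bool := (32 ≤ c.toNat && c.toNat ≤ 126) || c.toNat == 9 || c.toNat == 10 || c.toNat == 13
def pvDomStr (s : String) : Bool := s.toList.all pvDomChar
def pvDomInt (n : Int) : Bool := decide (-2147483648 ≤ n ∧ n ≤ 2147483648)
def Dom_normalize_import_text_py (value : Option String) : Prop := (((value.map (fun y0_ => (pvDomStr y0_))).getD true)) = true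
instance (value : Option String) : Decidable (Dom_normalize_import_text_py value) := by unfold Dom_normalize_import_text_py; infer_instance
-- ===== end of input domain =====

-- ===== PORT A =====
-- port of _normalize_import_text: strip, empty guard, lower, then five sequential .replace passes
def normalize_import_text_py (value : Option String) : String :=
  let text := match value with
    | none => ""
    | some s => PySem.Str.strip s
  if text = "" then ""
  else
    let text := PySem.Str.lower text
    [' ', '\t', '\n', '_', '-'].foldl
      (fun t ch => PySem.Str.replace t (String.ofList [ch]) "") text

-- ===== PORT B =====
-- B: one filtering pass over the lowered text, joining kept characters
def pvRemove : List Char := [' ', '\t', '\n', '_', '-']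

def normalize_import_text_py_alt (value : Option String) : String :=
  let text := match value with
    | none => ""
    | some s => PySem.Str.strip s
  if text = "" then ""
  else String.ofList ((PySem.Str.lower text).toList.filter (fun c => !pvRemove.contains c))

-- ===== PRECONDITION & SPEC =====
def Spec_normalize_import_text_py (value : Option String) (out : String) : Prop := out = normalize_import_text_py_alt value
instance (value : Option String) (out : String) : Decidable (Spec_normalize_import_text_py value out) := by unfold Spec_normalize_import_text_py; infer_instance

-- ===== CLAIM (what is proved, stated in full; the proofs are below) =====
def Claim_equal_normalize_import_text_py : Prop := ∀ (value : Option String), Dom_normalize_import_text_py value → Spec_normalize_import_text_py value (normalize_import_text_py value)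

-- ===== LEMMAS AND PROOFS =====
-- replace with a single-char pattern and empty replacement is a filter
theorem pv_go_filter (ch : Char) : ∀ (fuel : Nat) (l acc : List Char), l.length ≤ fuel →
    PySem.Chars.replace.go [ch] [] fuel l acc = acc.reverse ++ l.filter (fun c => c != ch) := by
  intro fuel
  induction fuel with
  | zero => intro l acc h; cases l with
    | nil => simp [PySem.Chars.replace.go]
    | cons c t => simp at h
  | succ n ih =>
    intro l acc h
    cases l with
    | nil => simp [PySem.Chars.replace.go]
    | cons c t =>
      simp only [PySem.Chars.replace.go]
      by_cases hc : c = ch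
      · rw [if_pos (by simp [List.isPrefixOf, hc])]
        simp only [List.length_cons, List.length_nil, List.drop_succ_cons, List.drop_zero,
          List.reverse_nil, List.nil_append]
        rw [ih t acc (by simpa using h)]
        simp [hc]
      · rw [if_neg (by simp only [List.isPrefixOf, Bool.and_true,
          beq_iff_eq]; exact fun he => hc he.symm)]
        rw [ih t (c :: acc) (by simpa using h)]
        simp [hc]

theorem pv_replace_single (ch : Char) (cs : List Char) :
    PySem.Chars.replace cs [ch] [] = cs.filter (fun c => c != ch) := by
  rw [PySem.Chars.replace, if_neg (by simp)]
  simpa using pv_go_filter ch cs.length cs [] le_rfl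

-- folding single-char filters over a list of characters filters out the whole set
theorem pv_foldl_filter (chs : List Char) (cs : List Char) :
    chs.foldl (fun l ch => l.filter (fun c => c != ch)) cs
      = cs.filter (fun c => !chs.contains c) := by
  induction chs generalizing cs with
  | nil => simp
  | cons ch rest ih =>
    rw [List.foldl_cons, ih, List.filter_filter]
    congr 1
    funext c
    by_cases h : c = ch <;> simp [h]

theorem pv_foldl_replace (chs : List Char) (cs : List Char) :
    chs.foldl (fun l ch => PySem.Chars.replace l [ch] []) cs
      = cs.filter (fun c => !chs.contains c) := by
  have he : (fun (l : List Char) (ch : Char) => PySem.Chars.replace l [ch] [])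
      = fun l ch => l.filter (fun c => c != ch) := by
    funext l ch; exact pv_replace_single ch l
  rw [he, pv_foldl_filter]

theorem pv_foldl_replace_str (chs : List Char) (s : String) :
    (chs.foldl (fun t ch => PySem.Str.replace t (String.ofList [ch]) "") s).toList
      = chs.foldl (fun l ch => PySem.Chars.replace l [ch] []) s.toList := by
  induction chs generalizing s with
  | nil => rfl
  | cons ch rest ih =>
    rw [List.foldl_cons, List.foldl_cons, ih, PySem.Str.toList_replace, String.toList_ofList]
    rfl

-- ===== VERDICT (by name: the statement is the Claim_ definition above) =====
theorem normalize_import_text_py_spec : Claim_equal_normalize_import_text_py := by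
  intro value _
  unfold Spec_normalize_import_text_py normalize_import_text_py normalize_import_text_py_alt
  cases value with
  | none => rfl
  | some s =>
    simp only
    split_ifs with h
    · rfl
    · apply String.toList_injective
      rw [pv_foldl_replace_str, pv_foldl_replace, String.toList_ofList]
      simp [pvRemove]
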